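-- pv_equiv track=rewrite | github.com/ambrosejcarr/seqc | src/seqc/three_bit.py | ints2int
-- ===== SOURCE A (Python) =====
-- def ints2int(ints):
--     """convert [i1, i2, i3] -> 0bi1i2i3"""
--
--     res = 0
--     for num in ints:
--         tmp = num
--         # Get length of next number to concatenate (with enough room for leading 0's)
--         while tmp > 0:
--             res <<= 3
--             tmp >>= 3
--         res += num
--     return res
-- ===== SOURCE B (Python) =====
-- def ints2int(ints):
--     """convert [i1, i2, i3] -> 0bi1i2i3"""
--     res = 0
--     for num in ints:
--         if num > 0:
--             res <<= 3 * ((num.bit_length() + 2) // 3)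
--         res += num
--     return res
-- ===== Notes on version B (the rewrite author's own statement) =====
-- stated objective: simpler
-- what changed: The inner while-loop that counts 3-bit groups by repeatedly right-shifting is replaced by a closed-form shift computed from num.bit_length(), so each element is handled with one shift instead of a loop.
import Mathlib
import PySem

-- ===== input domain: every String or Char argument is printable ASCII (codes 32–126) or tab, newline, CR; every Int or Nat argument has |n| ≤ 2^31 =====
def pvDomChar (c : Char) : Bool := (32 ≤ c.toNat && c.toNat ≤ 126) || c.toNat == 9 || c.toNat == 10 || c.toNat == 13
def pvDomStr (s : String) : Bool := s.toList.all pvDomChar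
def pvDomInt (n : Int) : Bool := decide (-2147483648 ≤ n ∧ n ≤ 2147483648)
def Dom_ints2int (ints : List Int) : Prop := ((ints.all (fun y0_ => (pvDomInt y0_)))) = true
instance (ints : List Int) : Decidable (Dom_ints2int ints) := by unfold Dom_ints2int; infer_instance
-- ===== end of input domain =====

-- B replaces A's inner group-counting while-loop by a closed-form shift from bit_length (simpler, one shift per element).

-- ===== PORT A =====
-- inner 'while tmp > 0: res <<= 3; tmp >>= 3' loop of A
def ints2intLoop (res tmp : Int) : Int :=
  if _h : tmp > 0 then ints2intLoop (res <<< (3:Nat)) (tmp >>> (3:Nat)) else res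
termination_by tmp.toNat
decreasing_by
  have h8 : tmp >>> (3:Nat) = tmp / 8 := by
    have := Int.shiftRight_eq_div_pow tmp 3
    norm_num at this
    exact this
  omega

def ints2int (ints : List Int) : Int :=
  ints.foldl (fun res num => ints2intLoop res num + num) 0

-- ===== PORT B =====
def ints2int_alt (ints : List Int) : Int :=
  ints.foldl (fun res num =>
    (if num > 0 then res <<< (3 * ((PySem.Int.bitLength num + 2) / 3)) else res) + num) 0

-- ===== PRECONDITION & SPEC =====
def Spec_ints2int (ints : List Int) (out : Int) : Prop := out = ints2int_alt ints
instance (ints : List Int) (out : Int) : Decidable (Spec_ints2int ints out) := by unfold Spec_ints2int; infer_instance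

-- ===== CLAIM (what is proved, stated in full; the proofs are below) =====
def Claim_equal_ints2int : Prop := ∀ (ints : List Int), Dom_ints2int ints → Spec_ints2int ints (ints2int ints)

-- ===== LEMMAS AND PROOFS =====

theorem ints2intLoop_nonpos (res tmp : Int) (h : ¬ tmp > 0) : ints2intLoop res tmp = res := by
  rw [ints2intLoop]; simp [h]

-- for positive n, A's inner loop multiplies res by 8 ^ ceil(bitLength n / 3)
theorem ints2intLoop_pos (n : Nat) (hn : 0 < n) (res : Int) :
    ints2intLoop res (n : Int) =
      res <<< (3 * ((PySem.Int.bitLength (n : Int) + 2) / 3)) := by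
  induction n using Nat.strong_induction_on generalizing res with
  | _ n ih =>
    rw [ints2intLoop]
    have hn' : (0 : Int) < (n : Int) := by exact_mod_cast hn
    simp only [gt_iff_lt, hn', dif_pos]
    have hsr : (n : Int) >>> (3:Nat) = ((n / 8 : Nat) : Int) := by
      rw [← Int.natCast_shiftRight]
      norm_num [Nat.shiftRight_eq_div_pow]
    by_cases h8 : 8 ≤ n
    · have hq : 0 < n / 8 := Nat.div_pos h8 (by norm_num)
      have hlt : n / 8 < n := Nat.div_lt_self hn (by norm_num)
      rw [hsr, ih (n / 8) hlt hq]
      -- bitLength n = bitLength (n/8) + 3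
      have b1 := PySem.Int.bitLength_natCast (m := n) hn
      have b2 := PySem.Int.bitLength_natCast (m := n / 2) (by omega)
      have b3 := PySem.Int.bitLength_natCast (m := n / 2 / 2) (by omega)
      have e2 : n / 2 / 2 = n / 4 := by omega
      have e3 : n / 2 / 2 / 2 = n / 8 := by omega
      rw [e3] at b3
      have hb : PySem.Int.bitLength (n : Int) =
          PySem.Int.bitLength ((n / 8 : Nat) : Int) + 3 := by
        rw [b1, b2, b3]
      rw [hb]
      have hk : 3 * ((PySem.Int.bitLength ((n / 8 : Nat) : Int) + 3 + 2) / 3)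
          = 3 * ((PySem.Int.bitLength ((n / 8 : Nat) : Int) + 2) / 3) + 3 := by omega
      rw [hk]
      simp [Int.shiftLeft_eq, pow_add, mul_assoc, mul_comm]
    · -- 1 ≤ n ≤ 7 : one iteration, then loop stops
      have hdiv : n / 8 = 0 := by omega
      rw [hsr, hdiv]
      rw [ints2intLoop_nonpos _ _ (by norm_num)]
      have hb : 3 * ((PySem.Int.bitLength (n : Int) + 2) / 3) = 3 := by
        interval_cases n <;> decide
      rw [hb]


theorem ints2int_step (res num : Int) :
    ints2intLoop res num + num =
      (if num > 0 then res <<< (3 * ((PySem.Int.bitLength num + 2) / 3)) else res) + num := by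
  by_cases h : num > 0
  · have hnum : num = ((num.toNat : Nat) : Int) := by omega
    rw [if_pos h, hnum, ints2intLoop_pos num.toNat (by omega) res]
  · rw [if_neg h, ints2intLoop_nonpos _ _ h]

-- ===== VERDICT (by name: the statement is the Claim_ definition above) =====
theorem ints2int_spec : Claim_equal_ints2int := by
  intro ints _
  unfold Spec_ints2int ints2int ints2int_alt
  have hf : (fun (res num : Int) => ints2intLoop res num + num) =
      (fun (res num : Int) =>
        (if num > 0 then res <<< (3 * ((PySem.Int.bitLength num + 2) / 3)) else res) + num) :=
    funext fun r => funext fun n => ints2int_step r n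
  rw [hf]
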